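-- pv_equiv track=rewrite | github.com/noctwilliam/cprog | stewpid_parser.py | count_carry_operations
-- ===== SOURCE A (Python) =====
-- def count_carry_operations(num1, num2):
--     carry = 0
--     carry_count = 0
--
--     # Loop through each digit of num1 and num2
--     while num1 > 0 or num2 > 0:
--         # Get the rightmost digit of num1 and num2
--         digit1 = num1 % 10
--         digit2 = num2 % 10
--
--         # Add the digits and the carry
--         sum_digits = digit1 + digit2 + carry
--         if sum_digits >= 10:
--             # If the sum is greater than or equal to 10, there is a carry
--             carry = 1
--             carry_count += 1
--         else:
--             # If the sum is less than 10, there is no carry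
--             carry = 0
--
--         # Remove the rightmost digit from num1 and num2
--         num1 //= 10
--         num2 //= 10
--
--     return carry_count
-- ===== SOURCE B (Python) =====
-- def count_carry_operations(num1, num2):
--     # Kummer's theorem in base 10: the number of carries when adding num1 and num2
--     # equals (digitsum(num1) + digitsum(num2) - digitsum(num1 + num2)) / 9.
--     def digit_sum(n):
--         s = 0
--         while n > 0:
--             s += n % 10
--             n //= 10
--         return s
--     return (digit_sum(num1) + digit_sum(num2) - digit_sum(num1 + num2)) // 9
-- ===== Notes on version B (the rewrite author's own statement) =====
-- stated objective: alternative
-- what changed: Replaces the positional carry-simulation loop by Kummer's base-10 identity: the carry count is computed as (digitsum(num1)+digitsum(num2)-digitsum(num1+num2))//9 from three independent digit sums.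
-- outside the precondition, e.g. on count_carry_operations(-1, 5): A returns 1, B returns 0; on count_carry_operations(19, -5): A returns 2, B returns 0
import Mathlib
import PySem

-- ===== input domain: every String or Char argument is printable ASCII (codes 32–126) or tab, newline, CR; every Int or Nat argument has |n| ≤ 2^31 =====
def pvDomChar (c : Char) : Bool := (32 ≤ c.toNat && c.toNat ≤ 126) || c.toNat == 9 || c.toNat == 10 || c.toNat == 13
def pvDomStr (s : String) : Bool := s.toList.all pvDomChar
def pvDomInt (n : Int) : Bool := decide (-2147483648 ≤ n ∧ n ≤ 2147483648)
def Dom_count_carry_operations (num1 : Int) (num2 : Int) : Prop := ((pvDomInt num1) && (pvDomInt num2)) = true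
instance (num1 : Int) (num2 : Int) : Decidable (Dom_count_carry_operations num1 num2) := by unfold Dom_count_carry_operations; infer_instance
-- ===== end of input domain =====

-- B replaces A's positional carry-simulation loop by Kummer's base-10 identity
-- (carries = (digitsum num1 + digitsum num2 - digitsum (num1+num2)) // 9); same cost, different algorithm.

-- termination helpers for the while-loops (cited by decreasing_by)
theorem pvFd10_toNat_le (n : Int) : (PySem.Int.floordiv n 10).toNat ≤ n.toNat := by
  rw [PySem.Int.floordiv_eq_ediv_of_pos (by norm_num)]
  omega

theorem pvFd10_toNat_lt (n : Int) (h : 0 < n) : (PySem.Int.floordiv n 10).toNat < n.toNat := by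
  rw [PySem.Int.floordiv_eq_ediv_of_pos (by norm_num)]
  omega

-- ===== PORT A =====
-- the while-loop of A, state = (num1, num2, carry, carry_count)
def countCarryLoop (num1 num2 carry carry_count : Int) : Int :=
  if 0 < num1 ∨ 0 < num2 then
    let digit1 := PySem.Int.mod num1 10
    let digit2 := PySem.Int.mod num2 10
    let sum_digits := digit1 + digit2 + carry
    if sum_digits ≥ 10 then
      countCarryLoop (PySem.Int.floordiv num1 10) (PySem.Int.floordiv num2 10) 1 (carry_count + 1)
    else
      countCarryLoop (PySem.Int.floordiv num1 10) (PySem.Int.floordiv num2 10) 0 carry_count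
  else
    carry_count
termination_by num1.toNat + num2.toNat
decreasing_by
  · rcases ‹0 < num1 ∨ 0 < num2› with h | h
    · exact Nat.add_lt_add_of_lt_of_le (pvFd10_toNat_lt _ h) (pvFd10_toNat_le _)
    · exact Nat.add_lt_add_of_le_of_lt (pvFd10_toNat_le _) (pvFd10_toNat_lt _ h)
  · rcases ‹0 < num1 ∨ 0 < num2› with h | h
    · exact Nat.add_lt_add_of_lt_of_le (pvFd10_toNat_lt _ h) (pvFd10_toNat_le _)
    · exact Nat.add_lt_add_of_le_of_lt (pvFd10_toNat_le _) (pvFd10_toNat_lt _ h)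

def count_carry_operations (num1 : Int) (num2 : Int) : Int :=
  countCarryLoop num1 num2 0 0

-- ===== PORT B =====
-- the digit_sum helper's while-loop, accumulator s
def digitSumLoop (n s : Int) : Int :=
  if 0 < n then digitSumLoop (PySem.Int.floordiv n 10) (s + PySem.Int.mod n 10) else s
termination_by n.toNat
decreasing_by exact pvFd10_toNat_lt _ ‹0 < n›

def digitSum (n : Int) : Int := digitSumLoop n 0

def count_carry_operations_alt (num1 : Int) (num2 : Int) : Int :=
  PySem.Int.floordiv (digitSum num1 + digitSum num2 - digitSum (num1 + num2)) 9

-- ===== PRECONDITION & SPEC =====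
-- Pre_ excludes mixed-sign pairs: there A's carry count is an accident of Python's floor
-- division/modulo on the negative operand (quirky nonzero counts), a corner no caller of a
-- carry-counting routine would specify, and B's digit-sum formula gives its own value.
def Pre_count_carry_operations (num1 : Int) (num2 : Int) : Prop :=
  (0 ≤ num1 ∧ 0 ≤ num2) ∨ (num1 ≤ 0 ∧ num2 ≤ 0)
instance (num1 : Int) (num2 : Int) : Decidable (Pre_count_carry_operations num1 num2) := by
  unfold Pre_count_carry_operations; infer_instance

def pvWitness_count_carry_operations : Int × Int := (17, 85)

def Spec_count_carry_operations (num1 : Int) (num2 : Int) (out : Int) : Prop := out = count_carry_operations_alt num1 num2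
instance (num1 : Int) (num2 : Int) (out : Int) : Decidable (Spec_count_carry_operations num1 num2 out) := by unfold Spec_count_carry_operations; infer_instance

-- ===== CLAIM (what is proved, stated in full; the proofs are below) =====
def Claim_equal_count_carry_operations : Prop := ∀ (num1 : Int) (num2 : Int), Dom_count_carry_operations num1 num2 → Pre_count_carry_operations num1 num2 → Spec_count_carry_operations num1 num2 (count_carry_operations num1 num2)

-- ===== LEMMAS AND PROOFS =====

theorem pvDigitSum_zero : digitSum 0 = 0 := by
  unfold digitSum
  rw [digitSumLoop]
  norm_num

theorem pvDigitSum_one : digitSum 1 = 1 := by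
  unfold digitSum
  rw [digitSumLoop]
  rw [if_pos (by norm_num : (0:Int) < 1),
      (by decide : PySem.Int.floordiv 1 10 = 0),
      (by decide : PySem.Int.mod 1 10 = 1)]
  rw [digitSumLoop]
  norm_num

theorem digitSumLoop_acc (k : ℕ) : ∀ n : Int, n.toNat ≤ k → ∀ s, digitSumLoop n s = s + digitSumLoop n 0 := by
  induction k with
  | zero =>
    intro n hn s
    conv_lhs => rw [digitSumLoop]
    conv_rhs => rw [digitSumLoop]
    have h : ¬ 0 < n := by omega
    simp [h]
  | succ k ih =>
    intro n hn s
    conv_lhs => rw [digitSumLoop]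
    conv_rhs => rw [digitSumLoop]
    by_cases h : 0 < n
    · have hk : (PySem.Int.floordiv n 10).toNat ≤ k := by
        have := pvFd10_toNat_lt n h; omega
      simp only [if_pos h]
      rw [ih _ hk (s + PySem.Int.mod n 10), ih _ hk (0 + PySem.Int.mod n 10)]
      ring
    · simp [h]

theorem digitSum_step (n : Int) (h : 0 ≤ n) :
    digitSum n = PySem.Int.mod n 10 + digitSum (PySem.Int.floordiv n 10) := by
  rcases lt_or_eq_of_le h with hp | hz
  · unfold digitSum
    conv_lhs => rw [digitSumLoop]
    rw [if_pos hp, digitSumLoop_acc (PySem.Int.floordiv n 10).toNat _ le_rfl]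
    ring
  · subst hz
    rw [(by decide : PySem.Int.floordiv (0:Int) 10 = 0),
        (by decide : PySem.Int.mod (0:Int) 10 = 0)]
    simp

theorem countCarryLoop_acc (k : ℕ) : ∀ (a b : Int), a.toNat + b.toNat ≤ k → ∀ c cnt,
    countCarryLoop a b c cnt = cnt + countCarryLoop a b c 0 := by
  induction k with
  | zero =>
    intro a b hab c cnt
    conv_lhs => rw [countCarryLoop]
    conv_rhs => rw [countCarryLoop]
    have h : ¬ (0 < a ∨ 0 < b) := by omega
    simp [h]
  | succ k ih =>
    intro a b hab c cnt
    conv_lhs => rw [countCarryLoop]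
    conv_rhs => rw [countCarryLoop]
    by_cases h : 0 < a ∨ 0 < b
    · have hd : (PySem.Int.floordiv a 10).toNat + (PySem.Int.floordiv b 10).toNat ≤ k := by
        rcases h with h | h
        · have := pvFd10_toNat_lt a h; have := pvFd10_toNat_le b; omega
        · have := pvFd10_toNat_le a; have := pvFd10_toNat_lt b h; omega
      simp only [if_pos h]
      split_ifs
      · rw [ih _ _ hd 1 (cnt + 1), ih _ _ hd 1 (0 + 1)]; ring
      · rw [ih _ _ hd 0 cnt]
    · simp [h]

-- Kummer's identity with an incoming carry c ∈ {0,1}: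
-- digitSum a + digitSum b + c = digitSum (a+b+c) + 9 * (carries counted by A's loop)
theorem pvKummer (k : ℕ) : ∀ (a b : Int), a.toNat + b.toNat ≤ k → 0 ≤ a → 0 ≤ b →
    ∀ c : Int, (c = 0 ∨ c = 1) →
    digitSum a + digitSum b + c = digitSum (a + b + c) + 9 * countCarryLoop a b c 0 := by
  induction k with
  | zero =>
    intro a b hab ha hb c hc
    have ha0 : a = 0 := by omega
    have hb0 : b = 0 := by omega
    subst ha0; subst hb0
    rw [countCarryLoop]
    norm_num
    rcases hc with rfl | rfl <;> simp [pvDigitSum_zero, pvDigitSum_one]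
  | succ k ih =>
    intro a b hab ha hb c hc
    rw [countCarryLoop]
    by_cases h : 0 < a ∨ 0 < b
    · have hc' : 0 ≤ c ∧ c ≤ 1 := by rcases hc with rfl | rfl <;> norm_num
      have hma : PySem.Int.mod a 10 = a % 10 := PySem.Int.mod_eq_emod_of_pos (by norm_num)
      have hmb : PySem.Int.mod b 10 = b % 10 := PySem.Int.mod_eq_emod_of_pos (by norm_num)
      have hfa : PySem.Int.floordiv a 10 = a / 10 := PySem.Int.floordiv_eq_ediv_of_pos (by norm_num)
      have hfb : PySem.Int.floordiv b 10 = b / 10 := PySem.Int.floordiv_eq_ediv_of_pos (by norm_num)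
      have hd : (a / 10).toNat + (b / 10).toNat ≤ k := by
        rcases h with h | h
        · have h1 := pvFd10_toNat_lt a h; have h2 := pvFd10_toNat_le b
          rw [hfa] at h1; rw [hfb] at h2; omega
        · have h1 := pvFd10_toNat_le a; have h2 := pvFd10_toNat_lt b h
          rw [hfa] at h1; rw [hfb] at h2; omega
      have hda := digitSum_step a ha
      have hdb := digitSum_step b hb
      have hdab := digitSum_step (a + b + c) (by omega)
      rw [hma, hfa] at hda
      rw [hmb, hfb] at hdb
      rw [PySem.Int.mod_eq_emod_of_pos (by norm_num),
          PySem.Int.floordiv_eq_ediv_of_pos (by norm_num)] at hdab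
      simp only [if_pos h, hma, hmb, hfa, hfb]
      split_ifs with hs
      · -- carry case: digit1 + digit2 + c ≥ 10
        have hmod : (a + b + c) % 10 = a % 10 + b % 10 + c - 10 := by omega
        have hdiv : (a + b + c) / 10 = a / 10 + b / 10 + 1 := by omega
        rw [hmod, hdiv] at hdab
        have hIH := ih (a / 10) (b / 10) hd (by omega) (by omega) 1 (Or.inr rfl)
        have hacc := countCarryLoop_acc k (a / 10) (b / 10) hd 1 (0 + 1)
        rw [hacc]
        omega
      · -- no-carry case
        have hmod : (a + b + c) % 10 = a % 10 + b % 10 + c := by omega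
        have hdiv : (a + b + c) / 10 = a / 10 + b / 10 := by omega
        rw [hmod, hdiv] at hdab
        have hIH := ih (a / 10) (b / 10) hd (by omega) (by omega) 0 (Or.inl rfl)
        simp only [add_zero] at hIH
        omega
    · have ha0 : a = 0 := by omega
      have hb0 : b = 0 := by omega
      subst ha0; subst hb0
      simp only [if_neg h]
      rcases hc with rfl | rfl <;> simp [pvDigitSum_zero, pvDigitSum_one]

-- ===== VERDICT (by name: the statement is the Claim_ definition above) =====
theorem pvDigitSum_nonpos (n : Int) (h : n ≤ 0) : digitSum n = 0 := by
  unfold digitSum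
  rw [digitSumLoop]
  simp [show ¬ 0 < n by omega]

theorem count_carry_operations_spec : Claim_equal_count_carry_operations := by
  intro num1 num2 _ hpre
  unfold Spec_count_carry_operations count_carry_operations count_carry_operations_alt
  rcases hpre with ⟨h1, h2⟩ | ⟨h1, h2⟩
  case inr =>
    rw [countCarryLoop]
    rw [pvDigitSum_nonpos num1 h1, pvDigitSum_nonpos num2 h2,
        pvDigitSum_nonpos (num1 + num2) (by omega)]
    simp [show ¬ (0 < num1 ∨ 0 < num2) by omega,
          show PySem.Int.floordiv (0 + 0 - 0 : Int) 9 = 0 from by decide]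
  case inl =>
    have hK := pvKummer (num1.toNat + num2.toNat) num1 num2 le_rfl h1 h2 0 (Or.inl rfl)
    have heq : digitSum num1 + digitSum num2 - digitSum (num1 + num2)
        = 9 * countCarryLoop num1 num2 0 0 := by
      have hz : num1 + num2 + 0 = num1 + num2 := by ring
      rw [hz] at hK; omega
    rw [heq, PySem.Int.floordiv_eq_ediv_of_pos (by norm_num),
        Int.mul_ediv_cancel_left _ (by norm_num)]
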